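-- pv_equiv track=rewrite | github.com/KachalichMaxim/CashDeals_bot | business/validators.py | validate_deal_id
-- ===== SOURCE A (Python) =====
-- def validate_deal_id(deal_id: str) -> bool:
--     """Валидация формата DealID: <Чей объект>/<Локация>/<№>"""
--     if not deal_id:
--         return False
--
--     # Проверяем, что есть хотя бы два слеша (три части)
--     parts = deal_id.split('/')
--     if len(parts) < 3:
--         return False
--
--     # Все части должны быть не пустыми
--     for part in parts:
--         if not part.strip():
--             return False
--
--     return True
-- ===== SOURCE B (Python) =====
-- def validate_deal_id(deal_id: str) -> bool:
--     """Single pass over the characters: count slashes and track whether the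
--     current slash-separated segment contains a non-whitespace character."""
--     slashes = 0
--     has = False
--     for ch in deal_id:
--         if ch == '/':
--             if not has:
--                 return False
--             slashes += 1
--             has = False
--         elif not ch.isspace():
--             has = True
--     return has and slashes >= 2
-- ===== Notes on version B (the rewrite author's own statement) =====
-- stated objective: alternative
-- what changed: Replaces split('/') plus a per-part strip() loop with a single character pass that counts slashes and tracks whether the current segment has a non-whitespace character, so no parts list is built.
import Mathlib
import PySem

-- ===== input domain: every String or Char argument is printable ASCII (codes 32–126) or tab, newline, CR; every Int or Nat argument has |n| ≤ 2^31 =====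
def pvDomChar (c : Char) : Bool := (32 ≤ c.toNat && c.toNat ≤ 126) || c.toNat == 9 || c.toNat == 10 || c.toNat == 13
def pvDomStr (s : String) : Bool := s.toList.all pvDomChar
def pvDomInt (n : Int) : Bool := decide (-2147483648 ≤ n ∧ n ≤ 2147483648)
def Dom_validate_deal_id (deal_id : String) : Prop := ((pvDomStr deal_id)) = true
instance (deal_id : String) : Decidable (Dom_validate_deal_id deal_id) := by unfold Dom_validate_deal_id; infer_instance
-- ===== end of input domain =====

-- B replaces split('/') + per-part strip() loop by a single character pass (alternative decomposition, same O(n) cost).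

-- ===== PORT A =====
-- the 'for part in parts: if not part.strip(): return False' loop
def checkParts : List (List Char) → Bool
  | [] => true
  | part :: rest => if PySem.Chars.strip part = [] then false else checkParts rest

def validate_deal_id (deal_id : String) : Bool :=
  if deal_id.toList = [] then false
  else
    let parts := PySem.Chars.splitOn deal_id.toList ['/']
    if parts.length < 3 then false
    else checkParts parts

-- ===== PORT B =====
-- single pass: `slashes` counts '/', `has` = current segment has a non-whitespace char
def altLoop : List Char → Nat → Bool → Bool
  | [], slashes, has => has && decide (2 ≤ slashes)
  | c :: rest, slashes, has =>
    if c = '/' then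
      if has = false then false else altLoop rest (slashes + 1) false
    else if PySem.Chars.isspace c then altLoop rest slashes has
    else altLoop rest slashes true

def validate_deal_id_alt (deal_id : String) : Bool := altLoop deal_id.toList 0 false

-- ===== PRECONDITION & SPEC =====
def Spec_validate_deal_id (deal_id : String) (out : Bool) : Prop := out = validate_deal_id_alt deal_id
instance (deal_id : String) (out : Bool) : Decidable (Spec_validate_deal_id deal_id out) := by unfold Spec_validate_deal_id; infer_instance

-- ===== CLAIM (what is proved, stated in full; the proofs are below) =====
def Claim_equal_validate_deal_id : Prop := ∀ (deal_id : String), Dom_validate_deal_id deal_id → Spec_validate_deal_id deal_id (validate_deal_id deal_id)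

-- ===== LEMMAS AND PROOFS =====

-- reference recursion for splitting on '/': P l cur = parts of cur.reverse ++ l
def P : List Char → List Char → List (List Char)
  | [], cur => [cur.reverse]
  | c :: rest, cur => if c = '/' then cur.reverse :: P rest [] else P rest (c :: cur)

theorem P_ne_nil (l cur : List Char) : P l cur ≠ [] := by
  induction l generalizing cur with
  | nil => simp [P]
  | cons c rest ih => simp only [P]; split_ifs <;> simp [ih]

theorem go_eq_P : ∀ (fuel : Nat) (l cur : List Char) (acc : List (List Char)),
    l.length ≤ fuel →
    PySem.Chars.splitOn.go ['/'] fuel l cur acc = acc.reverse ++ P l cur := by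
  intro fuel
  induction fuel with
  | zero =>
    intro l cur acc h
    have : l = [] := by cases l <;> simp_all
    subst this
    simp [PySem.Chars.splitOn.go, P]
  | succ n ih =>
    intro l cur acc h
    cases l with
    | nil => simp [PySem.Chars.splitOn.go, P]
    | cons c rest =>
      rw [PySem.Chars.splitOn.go]
      by_cases hc : c = '/'
      · subst hc
        rw [if_pos (by simp [List.isPrefixOf])]
        simp only [List.length_singleton, List.drop_succ_cons, List.drop_zero]
        rw [ih rest [] (cur.reverse :: acc) (by simp at h; omega)]
        simp [P]
      · rw [if_neg (by simp [List.isPrefixOf]; exact fun h' => hc h'.symm)]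
        rw [ih rest (c :: cur) acc (by simp at h; omega)]
        simp [P, hc]

theorem splitOn_eq_P (l : List Char) : PySem.Chars.splitOn l ['/'] = P l [] := by
  rw [PySem.Chars.splitOn, go_eq_P (l.length + 1) l [] [] (by omega)]
  simp

theorem strip_eq_nil_iff (p : List Char) :
    (PySem.Chars.strip p = []) ↔ p.all PySem.Chars.isspace = true := by
  rw [PySem.Chars.strip, PySem.Chars.rstrip, PySem.Chars.lstrip]
  simp only [List.reverse_eq_nil_iff, List.dropWhile_eq_nil_iff, List.mem_reverse,
    List.all_eq_true]
  constructor
  · intro h x hx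
    rw [← List.takeWhile_append_dropWhile (p := PySem.Chars.isspace) (l := p)] at hx
    rcases List.mem_append.mp hx with h1 | h2
    · exact List.mem_takeWhile_imp h1
    · exact h x h2
  · intro h x hx
    exact h x ((List.dropWhile_sublist _).mem hx)

theorem checkParts_eq_all (ps : List (List Char)) :
    checkParts ps = ps.all (fun p => p.any (fun c => ! PySem.Chars.isspace c)) := by
  induction ps with
  | nil => rfl
  | cons p rest ih =>
    simp only [checkParts, List.all_cons, ih]
    have hiff : (PySem.Chars.strip p = []) ↔
        (p.any (fun c => ! PySem.Chars.isspace c) = false) := by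
      rw [strip_eq_nil_iff]
      simp [List.all_eq_true, List.any_eq_false]
    by_cases h : PySem.Chars.strip p = []
    · simp [h, hiff.mp h]
    · have hany : p.any (fun c => ! PySem.Chars.isspace c) = true := by
        cases ht : p.any (fun c => ! PySem.Chars.isspace c) with
        | false => exact absurd (hiff.mpr ht) h
        | true => rfl
      simp [h, hany]

theorem altLoop_eq_P : ∀ (l cur : List Char) (s : Nat),
    altLoop l s (cur.any (fun c => ! PySem.Chars.isspace c)) =
      match P l cur with
      | [] => false
      | p :: rest =>
          p.any (fun c => ! PySem.Chars.isspace c) &&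
          rest.all (fun q => q.any (fun c => ! PySem.Chars.isspace c)) &&
          decide (2 ≤ s + rest.length) := by
  intro l
  induction l with
  | nil =>
    intro cur s
    simp [altLoop, P]
  | cons c rest ih =>
    intro cur s
    by_cases hc : c = '/'
    · subst hc
      have hP : P ('/' :: rest) cur = cur.reverse :: P rest [] := by simp [P]
      rw [hP]
      obtain ⟨p', r', hpr⟩ : ∃ p' r', P rest [] = p' :: r' := by
        cases hx : P rest [] with
        | nil => exact absurd hx (P_ne_nil rest [])
        | cons a b => exact ⟨a, b, rfl⟩
      cases hcur : cur.any (fun c => ! PySem.Chars.isspace c) with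
      | false => simp [altLoop, hpr, hcur]
      | true =>
        have hL : altLoop ('/' :: rest) s true = altLoop rest (s + 1) false := by
          simp [altLoop]
        rw [hL]
        have hIH := ih [] (s + 1)
        simp only [List.any_nil] at hIH
        rw [hIH, hpr]
        have hn : s + 1 + r'.length = s + (r'.length + 1) := by omega
        simp [List.all_cons, hcur, hn]
        tauto
    · have hP : P (c :: rest) cur = P rest (c :: cur) := by simp [P, hc]
      rw [hP, ← ih (c :: cur) s]
      cases hs : PySem.Chars.isspace c with
      | true => simp [altLoop, hc, hs, List.any_cons]
      | false => simp [altLoop, hc, hs, List.any_cons]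

-- ===== VERDICT (by name: the statement is the Claim_ definition above) =====
theorem validate_deal_id_spec : Claim_equal_validate_deal_id := by
  intro deal_id _
  unfold Spec_validate_deal_id validate_deal_id validate_deal_id_alt
  have hB := altLoop_eq_P deal_id.toList [] 0
  simp only [List.any_nil] at hB
  rw [hB, splitOn_eq_P]
  simp only [checkParts_eq_all]
  obtain ⟨p, r, hpr⟩ : ∃ p r, P deal_id.toList [] = p :: r := by
    cases h : P deal_id.toList [] with
    | nil => exact absurd h (P_ne_nil _ _)
    | cons a b => exact ⟨a, b, rfl⟩
  rw [hpr]
  cases hl : deal_id.toList with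
  | nil =>
    rw [if_pos rfl]
    have : P ([] : List Char) [] = [[]] := by simp [P]
    rw [hl] at hpr; rw [this] at hpr
    cases hpr
    simp
  | cons a b =>
    rw [hl] at hpr
    rw [if_neg (by simp)]
    simp only [List.length_cons, List.all_cons]
    by_cases hlen : r.length + 1 < 3
    · rw [if_pos (by omega)]
      have hfalse : decide (2 ≤ 0 + r.length) = false := by
        simp only [decide_eq_false_iff_not]; omega
      rw [hfalse]
      simp
    · rw [if_neg (by omega)]
      have htrue : decide (2 ≤ 0 + r.length) = true := by
        simp only [decide_eq_true_eq]; omega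
      rw [htrue]
      simp
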